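-- pv_equiv track=rewrite | github.com/hantrleko/financial-analysis-agent | src/media_gen.py | _extract_toc
-- ===== SOURCE A (Python) =====
-- def _extract_toc(text: str) -> list[tuple[int, str]]:
--     """Extract headings from markdown text for TOC generation."""
--     entries: list[tuple[int, str]] = []
--     for line in text.split("\n"):
--         line = line.strip()
--         if line.startswith("# "):
--             entries.append((1, line[2:]))
--         elif line.startswith("## "):
--             entries.append((2, line[3:]))
--         elif line.startswith("### "):
--             entries.append((3, line[4:]))
--     return entries
-- ===== SOURCE B (Python) =====
-- def _hash_prefix(line):
--     n = 0
--     for ch in line: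
--         if ch != "#":
--             break
--         n += 1
--     return n
--
--
-- def _extract_toc(text: str) -> list[tuple[int, str]]:
--     """Extract headings from markdown text for TOC generation."""
--     out: list[tuple[int, str]] = []
--     for raw in text.split("\n"):
--         line = raw.strip()
--         n = _hash_prefix(line)
--         if 1 <= n <= 3 and line[n:n + 1] == " ":
--             out.append((n, line[n + 1:]))
--     return out
-- ===== Notes on version B (the rewrite author's own statement) =====
-- stated objective: alternative
-- what changed: Replaces the chain of three fixed heading-prefix tests by counting the leading hash-mark run once, guarding that the count is between 1 and 3 and followed by a space, and slicing the content after it.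
import Mathlib
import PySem

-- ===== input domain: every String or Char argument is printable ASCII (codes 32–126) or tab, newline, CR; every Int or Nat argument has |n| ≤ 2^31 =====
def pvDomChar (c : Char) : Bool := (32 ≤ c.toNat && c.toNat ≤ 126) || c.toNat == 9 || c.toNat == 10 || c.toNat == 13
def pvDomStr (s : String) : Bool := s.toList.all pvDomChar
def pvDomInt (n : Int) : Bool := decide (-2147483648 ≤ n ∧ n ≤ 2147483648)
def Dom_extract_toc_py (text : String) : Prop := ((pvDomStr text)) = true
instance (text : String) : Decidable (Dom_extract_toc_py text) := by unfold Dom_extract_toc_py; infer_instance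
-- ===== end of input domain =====

-- B replaces A's three fixed heading-prefix tests by counting the leading hash-mark run once and slicing at that count (alternative decomposition, same cost).


-- ===== PORT A =====
def extract_toc_py (text : String) : List (Int × String) :=
  ((PySem.Str.split? text "\n").getD []).foldl (fun entries rawLine =>
    let line := PySem.Str.strip rawLine
    if PySem.Str.startswith line "# " then
      entries ++ [((1 : Int), PySem.Str.slice line (some 2) none)]
    else if PySem.Str.startswith line "## " then
      entries ++ [((2 : Int), PySem.Str.slice line (some 3) none)]
    else if PySem.Str.startswith line "### " then
      entries ++ [((3 : Int), PySem.Str.slice line (some 4) none)]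
    else entries) []

-- ===== PORT B =====
-- port of Source B's _hash_prefix: length of the leading run of '#'
def hashPrefix : List Char → Nat
  | [] => 0
  | c :: cs => if c = '#' then hashPrefix cs + 1 else 0

def extract_toc_py_alt (text : String) : List (Int × String) :=
  ((PySem.Str.split? text "\n").getD []).foldl (fun out raw =>
    let line := PySem.Str.strip raw
    let n := hashPrefix line.toList
    if 1 ≤ n ∧ n ≤ 3 ∧ PySem.Str.slice line (some (n : Int)) (some ((n : Int) + 1)) = " " then
      out ++ [((n : Int), PySem.Str.slice line (some ((n : Int) + 1)) none)]
    else out) []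

-- ===== PRECONDITION & SPEC =====
def Spec_extract_toc_py (text : String) (out : List (Int × String)) : Prop := out = extract_toc_py_alt text
instance (text : String) (out : List (Int × String)) : Decidable (Spec_extract_toc_py text out) := by unfold Spec_extract_toc_py; infer_instance

-- ===== CLAIM (what is proved, stated in full; the proofs are below) =====
def Claim_equal_extract_toc_py : Prop := ∀ (text : String), Dom_extract_toc_py text → Spec_extract_toc_py text (extract_toc_py text)

-- ===== LEMMAS AND PROOFS =====

theorem ofList_eq_space (l : List Char) : (String.ofList l = " ") ↔ l = [' '] := by
  constructor
  · intro h; have := congrArg String.toList h; simpa using this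
  · rintro rfl; rfl

theorem sliceOne (cs : List Char) (k : Nat) :
    PySem.List.slice cs (some (k:Int)) (some ((k:Int)+1)) = (cs.drop k).take 1 := by
  have h : ((k:Int)+1) = ((k+1:Nat):Int) := by push_cast; ring
  rw [h, PySem.List.slice_natCast]
  simp

theorem sliceFromS (cs : List Char) (k : Nat) :
    PySem.List.slice cs (some ((k:Int)+1)) none = cs.drop (k+1) := by
  have h : ((k:Int)+1) = ((k+1:Nat):Int) := by push_cast; ring
  rw [h, PySem.List.slice_from_natCast]

theorem sliceFrom2 (cs : List Char) : PySem.List.slice cs (some 2) none = cs.drop 2 := by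
  exact_mod_cast PySem.List.slice_from_natCast cs 2

theorem sliceFrom3 (cs : List Char) : PySem.List.slice cs (some 3) none = cs.drop 3 := by
  exact_mod_cast PySem.List.slice_from_natCast cs 3

theorem sliceFrom4 (cs : List Char) : PySem.List.slice cs (some 4) none = cs.drop 4 := by
  exact_mod_cast PySem.List.slice_from_natCast cs 4

theorem step_eq (line : String) (acc : List (Int × String)) :
    (if PySem.Str.startswith line "# " then
        acc ++ [((1 : Int), PySem.Str.slice line (some 2) none)]
      else if PySem.Str.startswith line "## " then
        acc ++ [((2 : Int), PySem.Str.slice line (some 3) none)]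
      else if PySem.Str.startswith line "### " then
        acc ++ [((3 : Int), PySem.Str.slice line (some 4) none)]
      else acc)
    = (let n := hashPrefix line.toList
       if 1 ≤ n ∧ n ≤ 3 ∧ PySem.Str.slice line (some (n : Int)) (some ((n : Int) + 1)) = " " then
         acc ++ [((n : Int), PySem.Str.slice line (some ((n : Int) + 1)) none)]
       else acc) := by
  simp only [PySem.Str.startswith, PySem.Str.slice, PySem.Chars.slice_eq_listSlice,
    ofList_eq_space, sliceOne, sliceFromS, sliceFrom2, sliceFrom3, sliceFrom4]
  generalize line.toList = cs
  rcases cs with _ | ⟨c, cs⟩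
  · simp [hashPrefix, PySem.Chars.startswith]
  by_cases hc : c = '#'
  case neg =>
    simp [hashPrefix, PySem.Chars.startswith, List.isPrefixOf, hc, Ne.symm hc]
  subst hc
  rcases cs with _ | ⟨d, cs⟩
  · simp [hashPrefix, PySem.Chars.startswith, List.isPrefixOf]
  by_cases hd : d = '#'
  case neg =>
    by_cases hsp : d = ' '
    · subst hsp
      simp [hashPrefix, PySem.Chars.startswith, List.isPrefixOf]
    · simp [hashPrefix, PySem.Chars.startswith, List.isPrefixOf, hd, hsp, Ne.symm hd, Ne.symm hsp]
  subst hd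
  rcases cs with _ | ⟨e, cs⟩
  · simp [hashPrefix, PySem.Chars.startswith, List.isPrefixOf]
  by_cases he : e = '#'
  case neg =>
    by_cases hsp : e = ' '
    · subst hsp
      simp [hashPrefix, PySem.Chars.startswith, List.isPrefixOf]
    · simp [hashPrefix, PySem.Chars.startswith, List.isPrefixOf, he, hsp, Ne.symm he, Ne.symm hsp]
  subst he
  rcases cs with _ | ⟨f, cs⟩
  · simp [hashPrefix, PySem.Chars.startswith, List.isPrefixOf]
  by_cases hf : f = '#'
  case neg =>
    by_cases hsp : f = ' '
    · subst hsp
      simp [hashPrefix, PySem.Chars.startswith, List.isPrefixOf]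
    · simp [hashPrefix, PySem.Chars.startswith, List.isPrefixOf, hf, hsp, Ne.symm hsp]
  subst hf
  simp [hashPrefix, PySem.Chars.startswith, List.isPrefixOf]

theorem step_fun_eq :
    (fun (entries : List (Int × String)) (rawLine : String) =>
      let line := PySem.Str.strip rawLine
      if PySem.Str.startswith line "# " then
        entries ++ [((1 : Int), PySem.Str.slice line (some 2) none)]
      else if PySem.Str.startswith line "## " then
        entries ++ [((2 : Int), PySem.Str.slice line (some 3) none)]
      else if PySem.Str.startswith line "### " then
        entries ++ [((3 : Int), PySem.Str.slice line (some 4) none)]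
      else entries)
    = (fun (out : List (Int × String)) (raw : String) =>
      let line := PySem.Str.strip raw
      let n := hashPrefix line.toList
      if 1 ≤ n ∧ n ≤ 3 ∧ PySem.Str.slice line (some (n : Int)) (some ((n : Int) + 1)) = " " then
        out ++ [((n : Int), PySem.Str.slice line (some ((n : Int) + 1)) none)]
      else out) := by
  funext acc raw
  exact step_eq (PySem.Str.strip raw) acc

-- ===== VERDICT (by name: the statement is the Claim_ definition above) =====
theorem extract_toc_py_spec : Claim_equal_extract_toc_py := by
  intro text _
  unfold Spec_extract_toc_py extract_toc_py extract_toc_py_alt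
  rw [step_fun_eq]
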